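-- pv_equiv track=rewrite | github.com/lee-pham/Pyse-60 | reprtest.py | megaparse
-- ===== SOURCE A (Python) =====
-- linecode = [' ', '!', '"', '#', '$', '%', '&', "'", '(', ')',
--             '*', '+', ',', '-', '.', '/', '0', '1', '2', '3',
--             '4', '5', '6', '7', '8', '9', ':', ';', '<', '=',
--             '>', '?', '@', 'A', 'B', 'C', 'D', 'E', 'F', 'G',
--             'H', 'I', 'J', 'K', 'L', 'M', 'N', 'O', 'P', 'Q',
--             'R', 'S', 'T', 'U', 'V', 'W', 'X', 'Y', 'Z', '[',
--             '\\', ']', '^', '_', '`', 'a', 'b', 'c', 'd', 'e',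
--             'f', 'g', 'h', 'i', 'j', 'k', 'l', 'm', 'n', 'o',
--             'p']
--
-- def megaparse(escsplit):
--     for i, string in enumerate(escsplit):
--
--         if string[0] == '=' and string[-1] == '\n':
--             templist = list(string[:-1])
--             rowint = linecode.index(string[1])
--             col = string[2]
--
--             for j, char in enumerate(templist):
--                 if char == '\n':
--                     rowint += 1
--                     templist[j] = '=' + linecode[rowint] + col
--
--             escsplit[i] = ''.join(templist)
--
--     return escsplit
-- ===== SOURCE B (Python) =====
-- linecode = [' ', '!', '"', '#', '$', '%', '&', "'", '(', ')',
--             '*', '+', ',', '-', '.', '/', '0', '1', '2', '3',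
--             '4', '5', '6', '7', '8', '9', ':', ';', '<', '=',
--             '>', '?', '@', 'A', 'B', 'C', 'D', 'E', 'F', 'G',
--             'H', 'I', 'J', 'K', 'L', 'M', 'N', 'O', 'P', 'Q',
--             'R', 'S', 'T', 'U', 'V', 'W', 'X', 'Y', 'Z', '[',
--             '\\', ']', '^', '_', '`', 'a', 'b', 'c', 'd', 'e',
--             'f', 'g', 'h', 'i', 'j', 'k', 'l', 'm', 'n', 'o',
--             'p']
--
--
-- def megaparse(escsplit):
--     # Same in-place update and return; per-segment split-and-rejoin instead of
--     # per-character scan-and-mutate.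
--     for i, string in enumerate(escsplit):
--         if string[0] == '=' and string[-1] == '\n':
--             base = linecode.index(string[1])
--             col = string[2]
--             segments = string[:-1].split('\n')
--             parts = [segments[0]]
--             for m, segment in enumerate(segments[1:]):
--                 parts.append('=' + linecode[base + 1 + m] + col + segment)
--             escsplit[i] = ''.join(parts)
--     return escsplit
-- ===== Notes on version B (the rewrite author's own statement) =====
-- stated objective: simpler
-- what changed: B splits string[:-1] into segments on '\n' and rejoins them with freshly built '='+linecode[base+1+m]+col prefixes, instead of A's per-character scan over a char list that mutates each newline cell with a running row counter.
import Mathlib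
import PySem

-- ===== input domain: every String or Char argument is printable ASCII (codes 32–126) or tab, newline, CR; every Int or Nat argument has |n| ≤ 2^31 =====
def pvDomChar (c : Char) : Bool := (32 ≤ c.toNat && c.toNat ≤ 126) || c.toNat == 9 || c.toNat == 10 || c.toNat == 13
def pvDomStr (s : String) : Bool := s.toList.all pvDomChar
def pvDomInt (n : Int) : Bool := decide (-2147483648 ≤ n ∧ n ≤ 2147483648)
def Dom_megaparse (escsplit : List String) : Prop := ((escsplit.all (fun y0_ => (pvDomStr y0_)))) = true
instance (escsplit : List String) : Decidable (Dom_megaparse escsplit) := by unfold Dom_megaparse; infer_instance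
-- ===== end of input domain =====

-- B rewrites each matching line by splitting string[:-1] on '\n' and rejoining the
-- segments with fresh '='-row-col prefixes, instead of A's per-character scan that
-- mutates the newline cells of a char list; objective: simpler. Python A mutates
-- escsplit in place and returns it (B does the same); the theorems here are about
-- the returned value.

-- the module constant `linecode` (the chars ' '..'p', codes 32..112)
def lcode : List Char :=
  [' ', '!', '"', '#', '$', '%', '&', '\'', '(', ')',
   '*', '+', ',', '-', '.', '/', '0', '1', '2', '3',
   '4', '5', '6', '7', '8', '9', ':', ';', '<', '=',
   '>', '?', '@', 'A', 'B', 'C', 'D', 'E', 'F', 'G',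
   'H', 'I', 'J', 'K', 'L', 'M', 'N', 'O', 'P', 'Q',
   'R', 'S', 'T', 'U', 'V', 'W', 'X', 'Y', 'Z', '[',
   '\\', ']', '^', '_', '`', 'a', 'b', 'c', 'd', 'e',
   'f', 'g', 'h', 'i', 'j', 'k', 'l', 'm', 'n', 'o',
   'p']

-- ===== PORT A =====
-- A's inner `for j, char in enumerate(templist)` loop: carries rowint, replaces each
-- '\n' cell by the three-char string '=' + linecode[rowint] + col (templist is a
-- Python list of strings, modelled as List (List Char)); linecode[rowint] is a plain
-- index, `getD` with Pre_ excluding the out-of-range IndexError.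
def loopA (col : Char) : Nat → List Char → Nat × List (List Char)
  | rowint, [] => (rowint, [])
  | rowint, c :: rest =>
    if c = '\n' then
      let r' := rowint + 1
      let (rf, out) := loopA col r' rest
      (rf, ['=', lcode.getD r' ' ', col] :: out)
    else
      let (rf, out) := loopA col rowint rest
      (rf, [c] :: out)

-- one iteration of A's outer loop body (string[0], string[-1], string[1], string[2]
-- exist under Pre_, so headD/getLastD/getD are exact; linecode.index = PySem.List.index?,
-- its none case (ValueError) is excluded by Pre_)
def procA (s : String) : String :=
  let cs := s.toList
  if cs.headD ' ' = '=' ∧ cs.getLastD ' ' = '\n' then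
    let templist := cs.dropLast                                  -- list(string[:-1])
    let rowint := (PySem.List.index? lcode (cs.getD 1 ' ')).getD 0
    let col := cs.getD 2 ' '
    String.mk (loopA col rowint templist).2.flatten              -- ''.join(templist)
  else s

-- `for i, string in enumerate(escsplit): … escsplit[i] = …; return escsplit`:
-- each slot is rewritten from its own old value only, so the returned list is the map
def megaparse (escsplit : List String) : List String := escsplit.map procA

-- ===== PORT B =====
-- B's `for m, segment in enumerate(segments[1:])` loop building parts[1:]
def buildB (col : Char) (base : Nat) : Nat → List (List Char) → List (List Char)
  | _, [] => []
  | m, seg :: rest =>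
    ('=' :: lcode.getD (base + 1 + m) ' ' :: col :: seg) :: buildB col base (m + 1) rest

-- one iteration of B's outer loop body; string[:-1].split('\n') is List.splitOn '\n'
def procB (s : String) : String :=
  let cs := s.toList
  if cs.headD ' ' = '=' ∧ cs.getLastD ' ' = '\n' then
    let base := (PySem.List.index? lcode (cs.getD 1 ' ')).getD 0
    let col := cs.getD 2 ' '
    let segments := cs.dropLast.splitOn '\n'
    String.mk ((segments.headD []) :: buildB col base 0 segments.tail).flatten  -- ''.join(parts)
  else s

def megaparse_alt (escsplit : List String) : List String := escsplit.map procB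

-- ===== PRECONDITION & SPEC =====
-- Pre_ excludes exactly the inputs where Python A raises: an empty string
-- (IndexError on string[0]), and, for lines matching the '='…'\n' guard, a second
-- character not in linecode (ValueError from linecode.index) or so many interior
-- newlines that rowint runs past linecode[80] (IndexError).
def Pre_megaparse (escsplit : List String) : Prop :=
  ∀ s ∈ escsplit, s.toList ≠ [] ∧
    ((s.toList.headD ' ' = '=' ∧ s.toList.getLastD ' ' = '\n') →
      (s.toList.getD 1 ' ') ∈ lcode ∧
      (PySem.List.index? lcode (s.toList.getD 1 ' ')).getD 0
        + s.toList.dropLast.count '\n' ≤ 80)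
instance (escsplit : List String) : Decidable (Pre_megaparse escsplit) := by
  unfold Pre_megaparse; infer_instance
def pvWitness_megaparse : List String := ["=!A\nhello\n", "plain", "=;;\n"]
def Spec_megaparse (escsplit : List String) (out : List String) : Prop := out = megaparse_alt escsplit
instance (escsplit : List String) (out : List String) : Decidable (Spec_megaparse escsplit out) := by unfold Spec_megaparse; infer_instance

-- ===== CLAIM (what is proved, stated in full; the proofs are below) =====
def Claim_equal_megaparse : Prop := ∀ (escsplit : List String), Dom_megaparse escsplit → Pre_megaparse escsplit → Spec_megaparse escsplit (megaparse escsplit)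

-- ===== LEMMAS AND PROOFS =====

-- shifting buildB's running segment counter into its base
theorem buildB_shift (col : Char) (base : Nat) (m : Nat) (segs : List (List Char)) :
    buildB col base (m + 1) segs = buildB col (base + 1) m segs := by
  induction segs generalizing m with
  | nil => rfl
  | cons seg rest ih =>
      have h : base + 1 + (m + 1) = base + 1 + 1 + m := by omega
      simp only [buildB, ih, h]

-- the heart: A's stateful per-character rewrite joins to B's split-and-rejoin
theorem loopA_eq_split (col : Char) (r : Nat) (cs : List Char) :
    (loopA col r cs).2.flatten
      = (cs.splitOn '\n').headD [] ++ (buildB col r 0 (cs.splitOn '\n').tail).flatten := by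
  induction cs generalizing r with
  | nil => rfl
  | cons c rest ih =>
      by_cases hc : c = '\n'
      · subst hc
        obtain ⟨h', t', ht⟩ : ∃ h' t', rest.splitOn '\n' = h' :: t' := by
          rcases hsp : rest.splitOn '\n' with _ | ⟨h', t'⟩
          · exact absurd hsp (List.splitOnP_ne_nil _ _)
          · exact ⟨h', t', rfl⟩
        have hcons : (('\n' :: rest).splitOn '\n') = [] :: rest.splitOn '\n' := rfl
        simp only [loopA, hcons, ht, List.headD, List.tail,
          List.flatten_cons, buildB, buildB_shift]
        simp [ih (r + 1), ht]
      · have hcons : ((c :: rest).splitOn '\n') = (rest.splitOn '\n').modifyHead (c :: ·) := by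
          simp [List.splitOn, List.splitOnP_cons, hc]
        obtain ⟨h', t', ht⟩ : ∃ h' t', rest.splitOn '\n' = h' :: t' := by
          rcases hsp : rest.splitOn '\n' with _ | ⟨h', t'⟩
          · exact absurd hsp (List.splitOnP_ne_nil _ _)
          · exact ⟨h', t', rfl⟩
        simp only [loopA, if_neg hc, hcons, ht, List.modifyHead, List.headD, List.tail,
          List.flatten_cons, ih r]
        simp

-- the two loop bodies agree on every string
theorem procA_eq_procB (s : String) : procA s = procB s := by
  by_cases h : s.toList.headD ' ' = '=' ∧ s.toList.getLastD ' ' = '\n'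
  · simp only [procA, procB, if_pos h, loopA_eq_split, List.flatten_cons]
  · simp only [procA, procB, if_neg h]

-- ===== VERDICT (by name: the statement is the Claim_ definition above) =====
theorem megaparse_spec : Claim_equal_megaparse := by
  intro escsplit _ _
  unfold Spec_megaparse megaparse megaparse_alt
  simp [procA_eq_procB]
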